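-- pv_equiv track=rewrite | github.com/acchow/oracle | consistent.py | concatenate_axioms
-- ===== SOURCE A (Python) =====
-- def concatenate_axioms(lines):
--     # clean up list
--     lines.remove("formulas(assumptions).\n")
--     lines.remove("end_of_list.\n")
--
--     for x, line in enumerate(lines):
--         while "%" in lines[x]:
--             lines.remove(lines[x])
--
--     try:
--         while True:
--             lines.remove("\n")
--     except ValueError:
--         pass
--
--     # put axioms together into one list
--     index_last_line = []
--     for c, val in enumerate(lines):
--         if "." in val:
--             index_last_line.append(c)
--
--     one_axiom = []
--     all_axioms = []
--     c2 = 0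
--     for c1, i in enumerate(index_last_line):
--         while c2 <= i:
--             one_axiom.append(lines[c2])
--             c2 += 1
--         all_axioms.append("".join(one_axiom))
--         one_axiom.clear()
--
--     return all_axioms
-- ===== SOURCE B (Python) =====
-- def concatenate_axioms(lines):
--     # Return-value equivalent to the original; unlike it, after the two
--     # sentinel removes this version does not mutate `lines` further.
--     lines.remove("formulas(assumptions).\n")
--     lines.remove("end_of_list.\n")
--
--     # the enumerate-while-mutate '%' loop and the '\n' removal loop of the
--     # original amount (wherever it returns) to dropping those lines outright
--     cleaned = [l for l in lines if "%" not in l and l != "\n"]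
--
--     # one pass: accumulate into a buffer, flush at each '.' line;
--     # anything after the last '.' is dropped (never flushed)
--     all_axioms = []
--     buf = []
--     for line in cleaned:
--         buf.append(line)
--         if "." in line:
--             all_axioms.append("".join(buf))
--             buf = []
--     return all_axioms
-- ===== Notes on version B (the rewrite author's own statement) =====
-- stated objective: simpler
-- what changed: The enumerate-while-mutate '%' removal loop and the try/while '\n' removal loop are replaced by a single filter comprehension (their net effect wherever A returns), and the two-pass grouping (index_last_line plus a replayed c2 cursor) by a single pass that flushes a running buffer at each '.'-line; B no longer mutates `lines` beyond the two sentinel removes (return-value equivalence).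
import Mathlib
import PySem

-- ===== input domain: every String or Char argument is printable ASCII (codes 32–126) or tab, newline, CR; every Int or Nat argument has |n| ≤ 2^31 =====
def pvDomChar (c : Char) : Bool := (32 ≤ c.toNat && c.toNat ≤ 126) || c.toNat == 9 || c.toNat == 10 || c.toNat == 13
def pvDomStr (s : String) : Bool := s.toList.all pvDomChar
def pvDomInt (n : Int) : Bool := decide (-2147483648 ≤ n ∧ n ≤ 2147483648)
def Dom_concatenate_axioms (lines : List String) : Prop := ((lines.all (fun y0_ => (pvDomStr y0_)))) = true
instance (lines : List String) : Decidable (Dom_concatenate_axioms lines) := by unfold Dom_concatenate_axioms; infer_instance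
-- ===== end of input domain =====

-- B replaces A's mutating removal loops by one filter and A's two-pass grouping by one
-- buffered pass; equivalence is about the RETURN value (A mutates `lines` in place beyond
-- the two sentinel removes, B does not).

-- ===== PORT A =====
-- lines.remove(v): first occurrence removed = List.erase; Python raises ValueError when
-- v is absent — those inputs are excluded by Pre_ below.
-- termination measures, factored into named lemmas (cited in decreasing_by)
theorem pv_erase_get_lt (L : List String) (x : Nat) (h : x < L.length) :
    (L.erase L[x]).length < L.length := by
  rw [List.length_erase_of_mem (List.getElem_mem h)]
  exact Nat.sub_lt (List.length_pos_of_mem (List.getElem_mem h)) Nat.one_pos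

theorem pv_erase_nl_lt (L : List String) (h : "\n" ∈ L) : (L.erase "\n").length < L.length := by
  rw [List.length_erase_of_mem h]
  exact Nat.sub_lt (List.length_pos_of_mem h) Nat.one_pos

theorem pv_oneAx_dec (i c2 : Int) (h : c2 ≤ i) :
    (i + 1 - (c2 + 1)).toNat < (i + 1 - c2).toNat := by
  have hb : 0 < i + 1 - c2 := Int.sub_pos.mpr (Int.lt_add_one_iff.mpr h)
  exact (Int.toNat_lt_toNat hb).mpr (sub_lt_sub_left (lt_add_one c2) (i + 1))

-- inner `while "%" in lines[x]: lines.remove(lines[x])`; Python re-reads lines[x] after each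
-- removal and raises IndexError when x runs off the end — excluded by Pre_ (here the loop stops).
def pctWhile (L : List String) (x : Nat) : List String :=
  if h : x < L.length then
    if PySem.Str.isIn "%" L[x] then pctWhile (L.erase L[x]) x else L
  else L
termination_by L.length
decreasing_by exact pv_erase_get_lt L x h

theorem pctWhile_length_le (L : List String) (x : Nat) : (pctWhile L x).length ≤ L.length := by
  fun_induction pctWhile L x with
  | case1 M hx hin ih =>
      exact le_trans ih (le_of_lt (pv_erase_get_lt M x hx))
  | case2 => exact le_refl _
  | case3 => exact le_refl _

theorem pv_pctFor_dec (L : List String) (x : Nat) (h : x < L.length) :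
    (pctWhile L x).length - (x + 1) < L.length - x := by
  have h2 : L.length - (x + 1) < L.length - x := by
    rw [← Nat.sub_sub]
    exact Nat.sub_lt (Nat.sub_pos_of_lt h) Nat.one_pos
  exact Nat.lt_of_le_of_lt (Nat.sub_le_sub_right (pctWhile_length_le L x) (x + 1)) h2

-- `for x, line in enumerate(lines)` over the mutating list: index x advances while x < len(lines)
def pctFor (L : List String) (x : Nat) : List String :=
  if x < L.length then pctFor (pctWhile L x) (x + 1) else L
termination_by L.length - x
decreasing_by exact pv_pctFor_dec L x (by assumption)

-- `while True: lines.remove("\n")` until ValueError: removes every "\n"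
def nlWhile (L : List String) : List String :=
  if h : "\n" ∈ L then nlWhile (L.erase "\n") else L
termination_by L.length
decreasing_by exact pv_erase_nl_lt L h

-- `while c2 <= i: one_axiom.append(lines[c2]); c2 += 1` (index in range under Pre_)
def oneAxiomWhile (L : List String) (i : Int) (c2 : Int) (one : List String) : List String × Int :=
  if c2 ≤ i then oneAxiomWhile L i (c2 + 1) (one ++ [PySem.List.pyGetD L c2 ""]) else (one, c2)
termination_by (i + 1 - c2).toNat
decreasing_by exact pv_oneAx_dec i c2 (by assumption)

def concatenate_axioms (lines : List String) : List String :=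
  let l2 := (lines.erase "formulas(assumptions).\n").erase "end_of_list.\n"
  let L := nlWhile (pctFor l2 0)
  -- index_last_line: positions of lines containing "."
  let idxs := (PySem.List.enumerate L 0).foldl
    (fun acc p => if PySem.Str.isIn "." p.2 then acc ++ [p.1] else acc) []
  -- replay a c2 cursor over idxs, joining each collected one_axiom
  (idxs.foldl (fun (st : Int × List String) i =>
      let r := oneAxiomWhile L i st.1 []
      (r.2, st.2 ++ [PySem.Str.join "" r.1])) ((0 : Int), ([] : List String))).2

-- ===== PORT B =====
def concatenate_axioms_alt (lines : List String) : List String :=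
  let cleaned := ((lines.erase "formulas(assumptions).\n").erase "end_of_list.\n").filter
      (fun l => !PySem.Str.isIn "%" l && !(l == "\n"))
  (cleaned.foldl (fun (st : List String × List String) line =>
      let buf := st.1 ++ [line]
      if PySem.Str.isIn "." line then (([] : List String), st.2 ++ [PySem.Str.join "" buf])
      else (buf, st.2)) (([] : List String), ([] : List String))).2

-- ===== PRECONDITION & SPEC =====
-- Pre_ excludes exactly the inputs where the Python A raises: ValueError when either sentinel
-- line is missing (B raises there too), and IndexError when, after the two sentinel removals,
-- the last remaining line contains '%' (A's enumerate-while-mutate loop runs its index off the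
-- end; B returns the grouped axioms of the '%'-free lines there).
def Pre_concatenate_axioms (lines : List String) : Prop :=
  "formulas(assumptions).\n" ∈ lines ∧
  "end_of_list.\n" ∈ lines.erase "formulas(assumptions).\n" ∧
  (((lines.erase "formulas(assumptions).\n").erase "end_of_list.\n").getLast?.all
      (fun s => !PySem.Str.isIn "%" s)) = true
instance (lines : List String) : Decidable (Pre_concatenate_axioms lines) := by
  unfold Pre_concatenate_axioms; infer_instance

def pvWitness_concatenate_axioms : List String :=
  ["formulas(assumptions).\n", "axiom(a,\n", "b).\n", "end_of_list.\n"]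

def Spec_concatenate_axioms (lines : List String) (out : List String) : Prop := out = concatenate_axioms_alt lines
instance (lines : List String) (out : List String) : Decidable (Spec_concatenate_axioms lines out) := by unfold Spec_concatenate_axioms; infer_instance

-- ===== CLAIM (what is proved, stated in full; the proofs are below) =====
def Claim_equal_concatenate_axioms : Prop := ∀ (lines : List String), Dom_concatenate_axioms lines → Pre_concatenate_axioms lines → Spec_concatenate_axioms lines (concatenate_axioms lines)

-- ===== LEMMAS AND PROOFS =====

-- A's '%' loop is, in the Lean port (which stops where Python raises), the filter that
-- drops every '%' line.
theorem pctWhile_eq (pre rest : List String)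
    (hpre : ∀ l ∈ pre, PySem.Str.isIn "%" l = false) :
    pctWhile (pre ++ rest) pre.length = pre ++ rest.dropWhile (fun l => PySem.Str.isIn "%" l) := by
  induction rest with
  | nil => rw [pctWhile]; simp
  | cons r rs ih =>
      rw [pctWhile]
      have hx : pre.length < (pre ++ r :: rs).length := by simp
      rw [dif_pos hx]
      have hget : (pre ++ r :: rs)[pre.length]'hx = r := by
        rw [List.getElem_append_right (le_refl _)]
        simp
      rw [hget]
      by_cases hc : PySem.Str.isIn "%" r = true
      · rw [if_pos hc]
        have hnot : r ∉ pre := fun hmem => by rw [hpre r hmem] at hc; cases hc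
        rw [List.erase_append_right _ hnot, List.erase_cons_head, ih]
        rw [List.dropWhile_cons, if_pos hc]
      · rw [if_neg hc, List.dropWhile_cons, if_neg hc]

theorem pctFor_eq (n : Nat) (pre rest : List String) (hn : rest.length ≤ n)
    (hpre : ∀ l ∈ pre, PySem.Str.isIn "%" l = false) :
    pctFor (pre ++ rest) pre.length = pre ++ rest.filter (fun l => !PySem.Str.isIn "%" l) := by
  induction n generalizing pre rest with
  | zero =>
      have : rest = [] := List.length_eq_zero_iff.mp (Nat.le_zero.mp hn)
      subst this
      rw [pctFor]; simp
  | succ m ih =>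
      cases rest with
      | nil => rw [pctFor]; simp
      | cons r rs =>
          rw [pctFor]
          have hx : pre.length < (pre ++ r :: rs).length := by simp
          rw [if_pos hx, pctWhile_eq pre (r :: rs) hpre]
          generalize hdw : (r :: rs).dropWhile (fun l => PySem.Str.isIn "%" l) = rest'
          have hfilt : (r :: rs).filter (fun l => !PySem.Str.isIn "%" l)
              = rest'.filter (fun l => !PySem.Str.isIn "%" l) := by
            conv_lhs => rw [← List.takeWhile_append_dropWhile (p := fun l => PySem.Str.isIn "%" l) (l := r :: rs)]
            rw [hdw, List.filter_append]
            have : ((r :: rs).takeWhile (fun l => PySem.Str.isIn "%" l)).filter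
                (fun l => !PySem.Str.isIn "%" l) = [] := by
              rw [List.filter_eq_nil_iff]
              intro a ha
              rw [List.mem_takeWhile_imp ha]
              simp
            rw [this, List.nil_append]
          cases rest' with
          | nil =>
              rw [pctFor]
              have : ¬ pre.length + 1 < pre.length := by omega
              rw [if_neg (by simp [this])]
              rw [hfilt]
              simp
          | cons h' t' =>
              have hh' : PySem.Str.isIn "%" h' = false := by
                have := List.head?_dropWhile_not (p := fun l => PySem.Str.isIn "%" l) (l := r :: rs)
                rw [hdw] at this
                simpa using this
              have hlen : t'.length ≤ m := by
                have h1 := List.length_dropWhile_le (fun l => PySem.Str.isIn "%" l) (r :: rs)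
                rw [hdw] at h1
                simp at h1 hn
                omega
              have heq : pre ++ h' :: t' = (pre ++ [h']) ++ t' := by simp
              have hlen2 : pre.length + 1 = (pre ++ [h']).length := by simp
              rw [heq, hlen2,
                ih (pre ++ [h']) t' hlen
                  (by intro l hl; rcases List.mem_append.mp hl with h | h
                      · exact hpre l h
                      · rw [List.mem_singleton.mp h]; exact hh')]
              rw [hfilt, List.filter_cons, hh']
              simp

theorem filter_erase_of_not {α : Type} [DecidableEq α] (q : α → Bool) (a : α) (hq : q a = false)
    (L : List α) : (L.erase a).filter q = L.filter q := by
  induction L with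
  | nil => rfl
  | cons b t ih =>
      by_cases hb : b = a
      · subst hb
        rw [List.erase_cons_head]
        simp [hq]
      · rw [List.erase_cons_tail (by simpa using hb)]
        simp [List.filter_cons, ih]

theorem nlWhile_eq (L : List String) : nlWhile L = L.filter (fun s => !(s == "\n")) := by
  fun_induction nlWhile L with
  | case1 M hmem ih =>
      rw [ih, filter_erase_of_not _ _ (by simp) M]
  | case2 M hmem =>
      symm
      rw [List.filter_eq_self]
      intro a ha
      simp only [Bool.not_eq_eq_eq_not, Bool.not_true, beq_eq_false_iff_ne, ne_eq]
      intro h; exact hmem (h ▸ ha)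

-- the full cleanup of A equals B's single filter
theorem cleanup_eq (l2 : List String) :
    nlWhile (pctFor l2 0) = l2.filter (fun l => !PySem.Str.isIn "%" l && !(l == "\n")) := by
  have h0 : pctFor l2 0 = l2.filter (fun l => !PySem.Str.isIn "%" l) := by
    have := pctFor_eq l2.length [] l2 (le_refl _) (by intro l hl; simp at hl)
    simpa using this
  rw [nlWhile_eq, h0, List.filter_filter]
  apply List.filter_congr
  intro a _
  exact Bool.and_comm _ _

-- reference grouping: accumulate into buf, flush at each '.'-line, drop the final buffer
def specG (buf : List String) : List String → List String
  | [] => []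
  | l :: r =>
      if PySem.Str.isIn "." l then PySem.Str.join "" (buf ++ [l]) :: specG [] r
      else specG (buf ++ [l]) r

theorem foldB_eq_specG (t : List String) (buf acc : List String) :
    (t.foldl (fun (st : List String × List String) line =>
      let b := st.1 ++ [line]
      if PySem.Str.isIn "." line then (([] : List String), st.2 ++ [PySem.Str.join "" b])
      else (b, st.2)) (buf, acc)).2 = acc ++ specG buf t := by
  induction t generalizing buf acc with
  | nil => simp [specG]
  | cons l r ih =>
      simp only [List.foldl_cons, specG]
      cases hc : PySem.Str.isIn "." l
      · simp only [Bool.false_eq_true, if_false]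
        exact ih (buf ++ [l]) acc
      · simp only [if_true]
        rw [ih [] (acc ++ [PySem.Str.join "" (buf ++ [l])])]
        simp

-- positions (from start index k) of the lines containing "."
def idxI (k : Int) : List String → List Int
  | [] => []
  | l :: r => if PySem.Str.isIn "." l then k :: idxI (k + 1) r else idxI (k + 1) r

theorem foldEnum_eq_idxI (t : List String) (s : Int) (acc : List Int) :
    (PySem.List.enumerate t s).foldl
      (fun acc p => if PySem.Str.isIn "." p.2 then acc ++ [p.1] else acc) acc
    = acc ++ idxI s t := by
  induction t generalizing s acc with
  | nil => simp [PySem.List.enumerate_nil, idxI]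
  | cons l r ih =>
      rw [PySem.List.enumerate_cons]
      simp only [List.foldl_cons, idxI]
      cases hc : PySem.Str.isIn "." l
      · simp only [Bool.false_eq_true, if_false]
        exact ih (s + 1) acc
      · simp only [if_true]
        rw [ih (s + 1) (acc ++ [s])]
        simp

theorem oneAxiomWhile_spec (n : Nat) (L : List String) (i : Int) (one : List String) :
    oneAxiomWhile L i (i + 1 - n) one
      = (one ++ (List.range n).map (fun j : Nat => PySem.List.pyGetD L (i + 1 - n + (j : Int)) ""), i + 1) := by
  induction n generalizing one with
  | zero => rw [oneAxiomWhile]; simp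
  | succ m ih =>
      rw [oneAxiomWhile]
      have hle : i + 1 - (m + 1 : Nat) ≤ i := by push_cast; omega
      rw [if_pos hle]
      have harg : i + 1 - (m + 1 : Nat) + 1 = i + 1 - m := by push_cast; omega
      rw [harg, ih]
      rw [List.range_succ_eq_map]
      refine Prod.ext ?_ rfl
      rw [List.append_assoc, List.singleton_append]
      simp only [List.map_cons, List.map_map, Nat.cast_zero, add_zero]
      congr 1
      congr 1
      apply List.map_congr_left
      intro j _
      simp only [Function.comp_apply]
      congr 1
      push_cast; omega

theorem getD_mid {α : Type} (pre M r : List α) (d : α) :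
    (List.range M.length).map (fun j => (pre ++ M ++ r).getD (pre.length + j) d) = M := by
  apply List.ext_getElem
  · simp
  · intro j h1 h2
    simp only [List.getElem_map, List.getElem_range]
    have hj : j < M.length := by simpa using h2
    rw [List.getD_eq_getElem _ _ (by simp; omega)]
    rw [List.getElem_append_left (by simp; omega)]
    rw [List.getElem_append_right (by omega)]
    congr 1
    omega

theorem foldA_eq_specG (L : List String) (tail buf pre acc : List String)
    (hL : L = pre ++ buf ++ tail) :
    ((idxI ((pre.length + buf.length : Nat) : Int) tail).foldl
      (fun (st : Int × List String) i =>
        let r := oneAxiomWhile L i st.1 []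
        (r.2, st.2 ++ [PySem.Str.join "" r.1])) (((pre.length : Nat) : Int), acc)).2
    = acc ++ specG buf tail := by
  induction tail generalizing buf pre acc with
  | nil => simp [idxI, specG]
  | cons l r ih =>
      simp only [idxI, specG]
      cases hc : PySem.Str.isIn "." l
      case false =>
        simp only [Bool.false_eq_true, if_false]
        have e5 : ((pre.length + buf.length : Nat) : Int) + 1
            = ((pre.length + (buf ++ [l]).length : Nat) : Int) := by simp; ring
        rw [e5]
        exact ih (buf ++ [l]) pre acc (by simp [hL, List.append_assoc])
      case true =>
        simp only [if_true, List.foldl_cons]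
        have hw := oneAxiomWhile_spec (buf.length + 1) L ((pre.length + buf.length : Nat) : Int) []
        have e1 : ((pre.length + buf.length : Nat) : Int) + 1 - ((buf.length + 1 : Nat) : Int)
            = ((pre.length : Nat) : Int) := by push_cast; ring
        rw [e1] at hw
        have e2 : (List.range (buf.length + 1)).map
            (fun j : Nat => PySem.List.pyGetD L (((pre.length : Nat) : Int) + (j : Int)) "")
            = buf ++ [l] := by
          have hmid := getD_mid pre (buf ++ [l]) r ""
          rw [show (buf ++ [l]).length = buf.length + 1 by simp] at hmid
          rw [← hmid]
          apply List.map_congr_left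
          intro j _
          rw [show ((pre.length : Nat) : Int) + (j : Int) = ((pre.length + j : Nat) : Int) by push_cast; ring]
          rw [PySem.List.pyGetD_natCast]
          congr 1
          rw [hL]
          simp
        simp only [hw, e2, List.nil_append]
        have e3 : ((pre.length + buf.length : Nat) : Int) + 1
            = (((pre ++ buf ++ [l]).length : Nat) : Int) := by simp; ring
        rw [e3]
        have ih' := ih [] (pre ++ buf ++ [l]) (acc ++ [PySem.Str.join "" (buf ++ [l])])
          (by rw [hL]; simp)
        simp only [List.length_nil, Nat.add_zero] at ih'
        rw [ih']
        simp

-- ===== VERDICT (by name: the statement is the Claim_ definition above) =====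
theorem concatenate_axioms_spec : Claim_equal_concatenate_axioms := by
  intro lines _ _
  show concatenate_axioms lines = concatenate_axioms_alt lines
  unfold concatenate_axioms concatenate_axioms_alt
  simp only [cleanup_eq, foldEnum_eq_idxI, foldB_eq_specG, List.nil_append]
  set C := ((lines.erase "formulas(assumptions).\n").erase "end_of_list.\n").filter
      (fun l => !PySem.Str.isIn "%" l && !(l == "\n")) with hC
  have h := foldA_eq_specG C C [] [] [] (by simp)
  simpa using h
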